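-- pv_equiv track=rewrite | github.com/Mikecranesync/Agent-Factory | agent_factory/tools/scrapers/base_scraper.py | _should_skip_manual
-- ===== SOURCE A (Python) =====
-- def _should_skip_manual(title: str, filename: str = "") -> bool:
--     """
--     Determine if manual should be skipped (low quality indicators).
--
--     Args:
--         title: Manual title
--         filename: Manual filename (optional)
--
--     Returns:
--         True if manual should be skipped
--     """
--     text = f"{title} {filename}".lower()
--
--     # Skip marketing materials
--     if any(word in text for word in ["brochure", "catalog", "flyer", "datasheet"]):
--         return True
--
--     # Skip quick reference cards (too short)
--     if any(word in text for word in ["quick reference", "qr card", "pocket guide"]):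
--         return True
--
--     # Skip old manuals (before 2000)
--     if "19" in text and any(year in text for year in ["1990", "1991", "1992", "1993", "1994", "1995", "1996", "1997", "1998", "1999"]):
--         return True
--
--     return False
-- ===== SOURCE B (Python) =====
-- _SKIP_WORDS = ("brochure", "catalog", "flyer", "datasheet",
--                "quick reference", "qr card", "pocket guide")
--
--
-- def _should_skip_manual(title: str, filename: str = "") -> bool:
--     text = f"{title} {filename}".lower()
--     if any(word in text for word in _SKIP_WORDS):
--         return True
--     # a 1990s year is exactly a 4-char window "199<digit>"; one windowed scan
--     return any(a == '1' and b == '9' and c == '9' and '0' <= d <= '9'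
--                for a, b, c, d in zip(text, text[1:], text[2:], text[3:]))
-- ===== Notes on version B (the rewrite author's own statement) =====
-- stated objective: alternative
-- what changed: Replaces the three separate keyword passes, the redundant decade guard and the ten year-substring searches with one flat keyword pass plus a single 4-char sliding-window scan for a nineties year.
import Mathlib
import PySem

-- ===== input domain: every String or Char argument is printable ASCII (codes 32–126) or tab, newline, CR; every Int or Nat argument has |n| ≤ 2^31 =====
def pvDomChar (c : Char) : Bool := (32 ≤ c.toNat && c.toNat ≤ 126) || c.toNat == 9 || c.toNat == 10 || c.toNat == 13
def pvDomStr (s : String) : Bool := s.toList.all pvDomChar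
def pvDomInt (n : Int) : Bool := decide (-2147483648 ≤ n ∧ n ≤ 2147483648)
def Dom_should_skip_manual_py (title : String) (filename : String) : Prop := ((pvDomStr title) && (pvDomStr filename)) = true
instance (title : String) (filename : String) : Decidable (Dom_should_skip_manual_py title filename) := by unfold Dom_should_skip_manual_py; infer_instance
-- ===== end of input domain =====

-- B keeps A's behaviour but uses one flat skip-word pass and a single 4-char
-- sliding-window scan for "199<digit>" instead of ten year searches behind a
-- redundant "19" guard (objective: alternative, same value everywhere).

-- ===== PORT A =====
def should_skip_manual_py (title : String) (filename : String) : Bool :=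
  let text := PySem.Str.lower (title ++ " " ++ filename)
  if ["brochure", "catalog", "flyer", "datasheet"].any (fun word => PySem.Str.isIn word text) then
    true
  else if ["quick reference", "qr card", "pocket guide"].any (fun word => PySem.Str.isIn word text) then
    true
  else if PySem.Str.isIn "19" text &&
      ["1990", "1991", "1992", "1993", "1994", "1995", "1996", "1997", "1998", "1999"].any
        (fun year => PySem.Str.isIn year text) then
    true
  else
    false

-- ===== PORT B =====
def pvSkipWords : List String :=
  ["brochure", "catalog", "flyer", "datasheet", "quick reference", "qr card", "pocket guide"]

-- the tuple (a, b, c, d) of Python's zip(text, text[1:], text[2:], text[3:]) as nested pairs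
def pvIsYearWindow (w : ((Char × Char) × Char) × Char) : Bool :=
  w.1.1.1 == '1' && w.1.1.2 == '9' && w.1.2 == '9' && ('0' ≤ w.2 && w.2 ≤ '9')

def should_skip_manual_py_alt (title : String) (filename : String) : Bool :=
  let text := PySem.Str.lower (title ++ " " ++ filename)
  if pvSkipWords.any (fun word => PySem.Str.isIn word text) then
    true
  else
    let t := text.toList
    -- zip(text, text[1:], text[2:], text[3:]) : slices are List.drop
    (((t.zip (t.drop 1)).zip (t.drop 2)).zip (t.drop 3)).any pvIsYearWindow

-- ===== PRECONDITION & SPEC =====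
def Spec_should_skip_manual_py (title : String) (filename : String) (out : Bool) : Prop := out = should_skip_manual_py_alt title filename
instance (title : String) (filename : String) (out : Bool) : Decidable (Spec_should_skip_manual_py title filename out) := by unfold Spec_should_skip_manual_py; infer_instance

-- ===== CLAIM (what is proved, stated in full; the proofs are below) =====
def Claim_equal_should_skip_manual_py : Prop := ∀ (title : String) (filename : String), Dom_should_skip_manual_py title filename → Spec_should_skip_manual_py title filename (should_skip_manual_py title filename)

-- ===== LEMMAS AND PROOFS =====

-- a 4-char pattern is never an infix of a shorter list
theorem pvShort (t : List Char) (h4 : t.length < 4) :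
    ¬ ∃ d, ('0' ≤ d ∧ d ≤ '9') ∧ ['1','9','9',d] <:+: t := by
  rintro ⟨d, -, h⟩
  have := h.length_le
  simp at this
  omega

-- the window scan finds exactly an infix "199<digit>"
theorem pvWindows_iff (t : List Char) :
    ((((t.zip (t.drop 1)).zip (t.drop 2)).zip (t.drop 3)).any pvIsYearWindow) = true ↔
      ∃ d, ('0' ≤ d ∧ d ≤ '9') ∧ ['1', '9', '9', d] <:+: t := by
  induction t with
  | nil => simp
  | cons c0 r ih =>
    rcases r with _ | ⟨c1, r⟩
    · constructor
      · intro h; simp at h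
      · intro h; exact absurd h (pvShort _ (by simp))
    rcases r with _ | ⟨c2, r⟩
    · constructor
      · intro h; simp at h
      · intro h; exact absurd h (pvShort _ (by simp))
    rcases r with _ | ⟨c3, r⟩
    · constructor
      · intro h; simp at h
      · intro h; exact absurd h (pvShort _ (by simp))
    simp only [List.drop_succ_cons, List.drop_zero, List.zip_cons_cons, List.any_cons,
      Bool.or_eq_true] at ih ⊢
    rw [ih]
    constructor
    · rintro (hw | ⟨d, hd, h⟩)
      · simp only [pvIsYearWindow, Bool.and_eq_true, beq_iff_eq, decide_eq_true_eq] at hw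
        obtain ⟨⟨⟨e1, e2⟩, e3⟩, h0, h9⟩ := hw
        subst e1; subst e2; subst e3
        exact ⟨c3, ⟨h0, h9⟩, ⟨[], r, rfl⟩⟩
      · exact ⟨d, hd, List.infix_cons h⟩
    · rintro ⟨d, hd, h⟩
      rw [List.infix_cons_iff] at h
      rcases h with h | h
      · left
        simp only [List.cons_prefix_cons] at h
        obtain ⟨e1, e2, e3, e4, -⟩ := h
        simp [pvIsYearWindow, ← e1, ← e2, ← e3, ← e4, hd.1, hd.2]
      · exact Or.inr ⟨d, hd, h⟩

-- a digit char is one of the ten literals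
theorem pvDigit_cases (d : Char) (h1 : '0' ≤ d) (h2 : d ≤ '9') :
    d = '0' ∨ d = '1' ∨ d = '2' ∨ d = '3' ∨ d = '4' ∨ d = '5' ∨ d = '6' ∨ d = '7' ∨ d = '8' ∨ d = '9' := by
  have b1 : 48 ≤ d.toNat := Fin.mk_le_mk.mp h1
  have b2 : d.toNat ≤ 57 := Fin.mk_le_mk.mp h2
  have hofn : Char.ofNat d.toNat = d := Char.ofNat_toNat d
  interval_cases h : d.toNat <;> subst hofn <;> decide

-- A's ten year searches are exactly the infix condition
theorem pvYears_iff (t : List Char) :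
    (["1990", "1991", "1992", "1993", "1994", "1995", "1996", "1997", "1998", "1999"].any
        (fun year => PySem.Chars.isIn year.toList t)) = true ↔
      ∃ d, ('0' ≤ d ∧ d ≤ '9') ∧ ['1', '9', '9', d] <:+: t := by
  simp only [List.any_cons, List.any_nil, Bool.or_false, Bool.or_eq_true,
    PySem.Chars.isIn_iff_infix, String.toList]
  constructor
  · intro h
    rcases h with h|h|h|h|h|h|h|h|h|h
    · exact ⟨'0', by decide, by simpa using h⟩
    · exact ⟨'1', by decide, by simpa using h⟩
    · exact ⟨'2', by decide, by simpa using h⟩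
    · exact ⟨'3', by decide, by simpa using h⟩
    · exact ⟨'4', by decide, by simpa using h⟩
    · exact ⟨'5', by decide, by simpa using h⟩
    · exact ⟨'6', by decide, by simpa using h⟩
    · exact ⟨'7', by decide, by simpa using h⟩
    · exact ⟨'8', by decide, by simpa using h⟩
    · exact ⟨'9', by decide, by simpa using h⟩
  · rintro ⟨d, ⟨h0, h9⟩, h⟩
    rcases pvDigit_cases d h0 h9 with e|e|e|e|e|e|e|e|e|e <;> subst e <;> tauto

-- any year infix forces A's redundant "19" guard
theorem pvGuard_of_year (t : List Char) (d : Char) (h : ['1','9','9',d] <:+: t) :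
    PySem.Chars.isIn ['1','9'] t = true := by
  rw [PySem.Chars.isIn_iff_infix]
  exact List.IsInfix.trans ⟨[], ['9', d], rfl⟩ h

-- A's guarded year block equals B's window scan
theorem pv_main (s : String) :
    (PySem.Str.isIn "19" s &&
      (["1990", "1991", "1992", "1993", "1994", "1995", "1996", "1997", "1998", "1999"].any
        (fun year => PySem.Str.isIn year s))) =
    ((((s.toList.zip (s.toList.drop 1)).zip (s.toList.drop 2)).zip (s.toList.drop 3)).any pvIsYearWindow) := by
  rw [Bool.eq_iff_iff]
  simp only [PySem.Str.isIn_eq, Bool.and_eq_true]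
  rw [pvWindows_iff, pvYears_iff]
  constructor
  · rintro ⟨-, hy⟩; exact hy
  · intro h
    obtain ⟨d, -, hinf⟩ := id h
    exact ⟨by simpa using pvGuard_of_year s.toList d hinf, h⟩

-- ===== VERDICT (by name: the statement is the Claim_ definition above) =====
theorem should_skip_manual_py_spec : Claim_equal_should_skip_manual_py := by
  intro title filename _
  unfold Spec_should_skip_manual_py should_skip_manual_py should_skip_manual_py_alt pvSkipWords
  generalize PySem.Str.lower (title ++ " " ++ filename) = s
  simp only [List.any_cons, List.any_nil, Bool.or_false]
  rw [← pv_main s]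
  cases h1 : PySem.Str.isIn "brochure" s <;>
  cases h2 : PySem.Str.isIn "catalog" s <;>
  cases h3 : PySem.Str.isIn "flyer" s <;>
  cases h4 : PySem.Str.isIn "datasheet" s <;>
  cases h5 : PySem.Str.isIn "quick reference" s <;>
  cases h6 : PySem.Str.isIn "qr card" s <;>
  cases h7 : PySem.Str.isIn "pocket guide" s <;>
  simp
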